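-- pv_equiv track=rewrite | github.com/GH0STH4CKER/TailoredWordlist | tailoredwordlist.py | format_combos
-- ===== SOURCE A (Python) =====
-- leet_map = {
--     'a': ['@', '4'],
--     's': ['$', '5'],
--     'i': ['1', '!'],
--     'o': ['0'],
--     'e': ['3'],
--     'g': ['6'],
--     'z': ['2'],
--     'A': ['@', '4'],
--     'S': ['$', '5'],
--     'I': ['1', '!'],
--     'O': ['0'],
--     'E': ['3'],
--     'G': ['6'],
--     'Z': ['2'],
-- }
--
-- def generate_leet_variants(word):
--     def recurse(index, current):
--         if index == len(word):
--             return [''.join(current)]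
--         char = word[index]
--         substitutions = leet_map.get(char, [char])
--         results = []
--         for sub in substitutions:
--             results += recurse(index + 1, current + [sub])
--         return results
--
--     return set(recurse(0, []))
--
-- def insert_specials(word, specials, middle_specials):
--     variants = set()
--     variants.add(word)
--
--     for s in specials:
--         variants.add(s + word)
--         variants.add(word + s)
--
--     for s in middle_specials:
--         for i in range(1, len(word)):
--             variants.add(word[:i] + s + word[i:])
--
--     return variants
--
-- def format_combos(raw_combos, specials, middle_specials, leet_mode, max_length):
--     final_set = set()
--
--     for combo in raw_combos:
--         base_variants = {combo}
--
--         if leet_mode: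
--             base_variants |= generate_leet_variants(combo)
--
--         for word in base_variants:
--             if 0 < len(word) <= max_length:
--                 final_set.add(word)
--                 final_set |= insert_specials(word, specials, middle_specials)
--
--     return sorted(final_set)
-- ===== SOURCE B (Python) =====
-- leet_map = {
--     'a': ['@', '4'],
--     's': ['$', '5'],
--     'i': ['1', '!'],
--     'o': ['0'],
--     'e': ['3'],
--     'g': ['6'],
--     'z': ['2'],
--     'A': ['@', '4'],
--     'S': ['$', '5'],
--     'I': ['1', '!'],
--     'O': ['0'],
--     'E': ['3'],
--     'G': ['6'],
--     'Z': ['2'],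
-- }
--
-- def format_combos(raw_combos, specials, middle_specials, leet_mode, max_length):
--     candidates = []
--     for combo in raw_combos:
--         words = [combo]
--         if leet_mode:
--             # option-table product instead of branching recursion
--             variants = ['']
--             for ch in combo:
--                 subs = leet_map.get(ch, [ch])
--                 variants = [v + s for v in variants for s in subs]
--             words += variants
--         for w in words:
--             if 0 < len(w) <= max_length:
--                 candidates.append(w)
--                 candidates += [s + w for s in specials]
--                 candidates += [w + s for s in specials]
--                 candidates += [w[:i] + s + w[i:] for s in middle_specials
--                                for i in range(1, len(w))]
--     return sorted(set(candidates))
-- ===== Notes on version B (the rewrite author's own statement) =====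
-- stated objective: alternative
-- what changed: Leet variants come from an iterative per-character option-table product (a flat fold) instead of A's branching recursion with an accumulator, and all variants are appended to one plain list (insert_specials inlined as comprehensions) that is deduplicated by a single set() just before sorting, instead of A's incrementally maintained sets and set unions.
import Mathlib
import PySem

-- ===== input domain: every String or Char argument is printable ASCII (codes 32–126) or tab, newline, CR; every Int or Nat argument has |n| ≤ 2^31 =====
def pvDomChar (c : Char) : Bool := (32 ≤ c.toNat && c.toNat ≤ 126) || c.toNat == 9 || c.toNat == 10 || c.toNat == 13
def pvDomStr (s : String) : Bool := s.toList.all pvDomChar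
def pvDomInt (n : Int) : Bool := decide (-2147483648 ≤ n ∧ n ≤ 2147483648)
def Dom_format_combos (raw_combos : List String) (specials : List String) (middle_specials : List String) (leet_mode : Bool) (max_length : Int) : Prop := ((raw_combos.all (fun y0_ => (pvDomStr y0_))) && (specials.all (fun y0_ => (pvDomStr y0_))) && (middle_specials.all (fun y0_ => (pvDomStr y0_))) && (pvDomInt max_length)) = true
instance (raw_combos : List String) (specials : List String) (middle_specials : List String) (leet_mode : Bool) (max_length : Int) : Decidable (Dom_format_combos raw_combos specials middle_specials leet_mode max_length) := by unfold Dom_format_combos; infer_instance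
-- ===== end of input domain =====

-- B replaces A's branching recursion for leet variants by an iterative per-character option-table
-- product and collects all candidate words in one plain list deduplicated by a single set before
-- sorting (objective: alternative decomposition, same cost). Equivalence is about return values
-- (neither program mutates its arguments).

-- ===== PORT A =====
-- module constant leet_map; keys and substitutions are 1-char Python strings, modelled as Char
-- (exact: all involved strings are sequences of code points on the stated ASCII domain)
def leet_map : PySem.Dict Char (List Char) := PySem.Dict.ofList
  [('a', ['@','4']), ('s', ['$','5']), ('i', ['1','!']), ('o', ['0']), ('e', ['3']),
   ('g', ['6']), ('z', ['2']), ('A', ['@','4']), ('S', ['$','5']), ('I', ['1','!']),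
   ('O', ['0']), ('E', ['3']), ('G', ['6']), ('Z', ['2'])]

-- recurse(index, current) of generate_leet_variants; the index into word becomes the obvious
-- structural recursion on the suffix rest = word[index:]; ''.join happens in the caller
def pvRecurse (rest : List Char) (current : List Char) : List (List Char) :=
  match rest with
  | [] => [current]
  | char :: rest' =>
    ((leet_map.get? char).getD [char]).foldl
      (fun results sub => results ++ pvRecurse rest' (current ++ [sub])) []

def generate_leet_variants (word : List Char) : PySem.Set String :=
  PySem.Set.ofList ((pvRecurse word []).map (fun cs => String.ofList cs))

def insert_specials (word : String) (specials : List String) (middle_specials : List String) :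
    PySem.Set String :=
  let variants : PySem.Set String := PySem.Set.add PySem.Set.empty word
  let variants := specials.foldl (fun v s =>
    PySem.Set.add (PySem.Set.add v (String.ofList (s.toList ++ word.toList)))
      (String.ofList (word.toList ++ s.toList))) variants
  let variants := middle_specials.foldl (fun v s =>
    (PySem.List.pyRange 1 (word.toList.length : Int)).foldl (fun v i =>
      PySem.Set.add v (String.ofList (PySem.List.slice word.toList none (some i) ++ s.toList ++
        PySem.List.slice word.toList (some i) none))) v) variants
  variants

def format_combos (raw_combos : List String) (specials : List String)
    (middle_specials : List String) (leet_mode : Bool) (max_length : Int) : List String :=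
  let final_set : PySem.Set String :=
    raw_combos.foldl (fun final_set combo =>
      let base_variants : PySem.Set String := PySem.Set.add PySem.Set.empty combo
      let base_variants := if leet_mode then
          PySem.Set.union base_variants (generate_leet_variants combo.toList)
        else base_variants
      -- iteration over the set base_variants: result is order-independent (everything lands in a set)
      base_variants.foldl (fun fs word =>
        if 0 < word.toList.length ∧ (word.toList.length : Int) ≤ max_length then
          PySem.Set.union (PySem.Set.add fs word) (insert_specials word specials middle_specials)
        else fs) final_set) PySem.Set.empty
  PySem.List.sorted final_set (fun x => x)

-- ===== PORT B =====
-- option-table product: variants = ['']; for ch in word: variants = [v+s for v in variants for s in subs]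
def pvLeetVariants (word : List Char) : List (List Char) :=
  word.foldl (fun variants ch =>
    variants.flatMap (fun v => ((leet_map.get? ch).getD [ch]).map (fun s => v ++ [s]))) [[]]

def format_combos_alt (raw_combos : List String) (specials : List String)
    (middle_specials : List String) (leet_mode : Bool) (max_length : Int) : List String :=
  let candidates : List String :=
    raw_combos.foldl (fun cand combo =>
      -- words = [combo]; if leet_mode: words += variants   (words carried as code-point lists)
      let words := [combo.toList] ++ (if leet_mode then pvLeetVariants combo.toList else [])
      words.foldl (fun cand w =>
        if 0 < w.length ∧ (w.length : Int) ≤ max_length then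
          cand ++ [String.ofList w]
            ++ specials.map (fun s => String.ofList (s.toList ++ w))
            ++ specials.map (fun s => String.ofList (w ++ s.toList))
            ++ middle_specials.flatMap (fun s =>
                 (List.range (w.length - 1)).map (fun i =>
                   String.ofList (w.take (i+1) ++ s.toList ++ w.drop (i+1))))
        else cand) cand) []
  PySem.List.sorted (PySem.Set.ofList candidates) (fun x => x)

-- ===== PRECONDITION & SPEC =====
def Spec_format_combos (raw_combos : List String) (specials : List String) (middle_specials : List String) (leet_mode : Bool) (max_length : Int) (out : List String) : Prop := out = format_combos_alt raw_combos specials middle_specials leet_mode max_length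
instance (raw_combos : List String) (specials : List String) (middle_specials : List String) (leet_mode : Bool) (max_length : Int) (out : List String) : Decidable (Spec_format_combos raw_combos specials middle_specials leet_mode max_length out) := by unfold Spec_format_combos; infer_instance

-- ===== CLAIM (what is proved, stated in full; the proofs are below) =====
def Claim_equal_format_combos : Prop := ∀ (raw_combos : List String) (specials : List String) (middle_specials : List String) (leet_mode : Bool) (max_length : Int), Dom_format_combos raw_combos specials middle_specials leet_mode max_length → Spec_format_combos raw_combos specials middle_specials leet_mode max_length (format_combos raw_combos specials middle_specials leet_mode max_length)

-- ===== LEMMAS AND PROOFS =====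

-- the per-position choice product both leet generators compute
def prodL : List Char → List (List Char)
  | [] => [[]]
  | c :: cs => ((leet_map.get? c).getD [c]).flatMap (fun s => (prodL cs).map (fun t => s :: t))

theorem pvRecurse_eq (rest : List Char) :
    ∀ current, pvRecurse rest current = (prodL rest).map (fun t => current ++ t) := by
  induction rest with
  | nil => intro current; simp [pvRecurse, prodL]
  | cons c cs ih =>
    intro current
    simp [pvRecurse, prodL, ih, List.map_map, List.flatMap_def, Function.comp_def,
      List.append_assoc]

theorem pvLeetVariants_eq (word : List Char) : pvLeetVariants word = prodL word := by
  have key : ∀ (acc : List (List Char)),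
      word.foldl (fun variants ch =>
        variants.flatMap (fun v => ((leet_map.get? ch).getD [ch]).map (fun s => v ++ [s]))) acc
      = acc.flatMap (fun v => (prodL word).map (fun t => v ++ t)) := by
    induction word with
    | nil => intro acc; simp [prodL]
    | cons c cs ih =>
      intro acc
      rw [List.foldl_cons, ih]
      simp [prodL, List.flatMap_assoc, List.map_flatMap, List.flatMap_map,
        List.map_map, Function.comp_def, List.append_assoc]
  have := key [[]]
  simpa [pvLeetVariants] using this

-- generic membership through a foldl whose step adds exactly the elements P x describes
theorem pv_mem_foldl_iff {α β : Type} (f : List β → α → List β) (P : α → β → Prop)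
    (h : ∀ s x y, y ∈ f s x ↔ y ∈ s ∨ P x y) :
    ∀ (l : List α) (s : List β) (y : β), y ∈ l.foldl f s ↔ y ∈ s ∨ ∃ x ∈ l, P x y := by
  intro l
  induction l with
  | nil => simp
  | cons a l ih =>
    intro s y
    rw [List.foldl_cons, ih, h]
    constructor
    · rintro ((hy | hp) | ⟨x, hx, hp⟩)
      · exact Or.inl hy
      · exact Or.inr ⟨a, List.mem_cons_self .., hp⟩
      · exact Or.inr ⟨x, List.mem_cons_of_mem _ hx, hp⟩
    · rintro (hy | ⟨x, hx, hp⟩)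
      · exact Or.inl (Or.inl hy)
      · rcases List.mem_cons.mp hx with rfl | hx
        · exact Or.inl (Or.inr hp)
        · exact Or.inr ⟨x, hx, hp⟩

-- generic Nodup preservation through a foldl
theorem pv_nodup_foldl {α β : Type} (f : List β → α → List β)
    (h : ∀ s x, s.Nodup → (f s x).Nodup) :
    ∀ (l : List α) (s : List β), s.Nodup → (l.foldl f s).Nodup := by
  intro l
  induction l with
  | nil => intro s hs; simpa using hs
  | cons a l ih => intro s hs; rw [List.foldl_cons]; exact ih _ (h s a hs)

-- what insert_specials contributes, over the code points of word
def GenF (specials middles : List String) (w : List Char) (y : String) : Prop :=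
  y = String.ofList w
  ∨ (∃ s ∈ specials, y = String.ofList (s.toList ++ w) ∨ y = String.ofList (w ++ s.toList))
  ∨ (∃ s ∈ middles, ∃ i : Nat, i < w.length - 1 ∧
      y = String.ofList (w.take (i+1) ++ s.toList ++ w.drop (i+1)))

theorem mem_insert_specials (word : String) (specials middles : List String) (y : String) :
    y ∈ insert_specials word specials middles ↔ GenF specials middles word.toList y := by
  unfold insert_specials GenF
  rw [pv_mem_foldl_iff _
    (fun s y => ∃ i : Int, (1 ≤ i ∧ i < (word.toList.length : Int)) ∧
      y = String.ofList (PySem.List.slice word.toList none (some i) ++ s.toList ++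
        PySem.List.slice word.toList (some i) none))
    (by
      intro s x y
      rw [pv_mem_foldl_iff _
        (fun i y => y = String.ofList (PySem.List.slice word.toList none (some i) ++ x.toList ++
          PySem.List.slice word.toList (some i) none))
        (by intro s i y; exact PySem.Set.mem_add s _ y)]
      simp only [PySem.List.mem_pyRange_one])]
  rw [pv_mem_foldl_iff _
    (fun s y => y = String.ofList (s.toList ++ word.toList) ∨ y = String.ofList (word.toList ++ s.toList))
    (by
      intro s x y
      rw [PySem.Set.mem_add, PySem.Set.mem_add]
      tauto)]
  rw [PySem.Set.mem_add]
  have hempty : (PySem.Set.empty : PySem.Set String) = [] := rfl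
  rw [hempty]
  simp only [List.not_mem_nil, false_or, String.ofList_toList]
  constructor
  · rintro ((hy | hsp) | ⟨s, hs, i, ⟨h1, h2⟩, hy⟩)
    · exact Or.inl hy
    · exact Or.inr (Or.inl hsp)
    · refine Or.inr (Or.inr ⟨s, hs, i.toNat - 1, by omega, ?_⟩)
      have hi1 : i.toNat - 1 + 1 = i.toNat := by omega
      rw [hi1, hy, PySem.List.slice_to _ (by omega), PySem.List.slice_from _ (by omega)]
  · rintro (hy | hsp | ⟨s, hs, i, hi, hy⟩)
    · exact Or.inl (Or.inl hy)
    · exact Or.inl (Or.inr hsp)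
    · refine Or.inr ⟨s, hs, ((i+1 : Nat) : Int), ⟨by omega, by omega⟩, ?_⟩
      rw [hy, PySem.List.slice_to _ (by omega), PySem.List.slice_from _ (by omega)]
      simp

-- which words a combo contributes (the combo itself, plus the leet product when enabled)
def WordP (leet_mode : Bool) (combo : String) (word : String) : Prop :=
  word = combo ∨ (leet_mode = true ∧ ∃ t ∈ prodL combo.toList, word = String.ofList t)

-- the qualifying filter and full candidate description shared by both programs
def CandP (specials middles : List String) (leet_mode : Bool) (max_length : Int)
    (combo : String) (y : String) : Prop :=
  ∃ word : String, WordP leet_mode combo word ∧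
    (0 < word.toList.length ∧ (word.toList.length : Int) ≤ max_length) ∧
    GenF specials middles word.toList y

theorem mem_base_variants (leet_mode : Bool) (combo word : String) :
    word ∈ (if leet_mode then
        PySem.Set.union (PySem.Set.add PySem.Set.empty combo) (generate_leet_variants combo.toList)
      else PySem.Set.add PySem.Set.empty combo) ↔ WordP leet_mode combo word := by
  unfold WordP
  have hempty : (PySem.Set.empty : PySem.Set String) = [] := rfl
  cases leet_mode with
  | false =>
    rw [if_neg (by simp)]
    rw [PySem.Set.mem_add, hempty]
    simp
  | true =>
    rw [if_pos rfl, PySem.Set.mem_union, PySem.Set.mem_add, hempty]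
    unfold generate_leet_variants
    rw [PySem.Set.mem_ofList, pvRecurse_eq]
    simp only [List.nil_append, List.map_map, List.mem_map, List.not_mem_nil, false_or,
      Function.comp_def, true_and, eq_comm]

theorem mem_A_final (raw_combos specials middles : List String) (leet_mode : Bool)
    (max_length : Int) (y : String) :
    y ∈ raw_combos.foldl (fun final_set combo =>
      (if leet_mode then
          PySem.Set.union (PySem.Set.add PySem.Set.empty combo) (generate_leet_variants combo.toList)
        else PySem.Set.add PySem.Set.empty combo).foldl (fun fs word =>
        if 0 < word.toList.length ∧ (word.toList.length : Int) ≤ max_length then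
          PySem.Set.union (PySem.Set.add fs word) (insert_specials word specials middles)
        else fs) final_set) PySem.Set.empty
    ↔ ∃ combo ∈ raw_combos, CandP specials middles leet_mode max_length combo y := by
  rw [pv_mem_foldl_iff _ (fun combo y => CandP specials middles leet_mode max_length combo y)
    (by
      intro s combo y
      rw [pv_mem_foldl_iff _
        (fun word y => (0 < word.toList.length ∧ (word.toList.length : Int) ≤ max_length) ∧
          (y = word ∨ GenF specials middles word.toList y))
        (by
          intro s word y
          split_ifs with hq
          · rw [PySem.Set.mem_union, PySem.Set.mem_add, mem_insert_specials]
            tauto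
          · tauto)]
      unfold CandP
      constructor
      · rintro (hy | ⟨word, hw, hq, hg⟩)
        · exact Or.inl hy
        · refine Or.inr ⟨word, (mem_base_variants leet_mode combo word).mp hw, hq, ?_⟩
          rcases hg with rfl | hg
          · exact Or.inl (String.ofList_toList).symm
          · exact hg
      · rintro (hy | ⟨word, hw, hq, hg⟩)
        · exact Or.inl hy
        · exact Or.inr ⟨word, (mem_base_variants leet_mode combo word).mpr hw, hq, Or.inr hg⟩)]
  have hempty : (PySem.Set.empty : PySem.Set String) = [] := rfl
  rw [hempty]; simp

theorem mem_B_candidates (raw_combos specials middles : List String) (leet_mode : Bool)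
    (max_length : Int) (y : String) :
    y ∈ raw_combos.foldl (fun cand combo =>
      ([combo.toList] ++ (if leet_mode then pvLeetVariants combo.toList else [])).foldl
        (fun cand w =>
        if 0 < w.length ∧ (w.length : Int) ≤ max_length then
          cand ++ [String.ofList w]
            ++ specials.map (fun s => String.ofList (s.toList ++ w))
            ++ specials.map (fun s => String.ofList (w ++ s.toList))
            ++ middles.flatMap (fun s =>
                 (List.range (w.length - 1)).map (fun i =>
                   String.ofList (w.take (i+1) ++ s.toList ++ w.drop (i+1))))
        else cand) cand) []
    ↔ ∃ combo ∈ raw_combos, CandP specials middles leet_mode max_length combo y := by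
  rw [pv_mem_foldl_iff _ (fun combo y => CandP specials middles leet_mode max_length combo y)
    (by
      intro s combo y
      rw [pv_mem_foldl_iff _
        (fun w y => (0 < w.length ∧ (w.length : Int) ≤ max_length) ∧ GenF specials middles w y)
        (by
          intro s w y
          split_ifs with hq
          · simp only [List.mem_append, List.mem_singleton, List.mem_map, List.mem_flatMap,
              List.mem_range, GenF]
            constructor
            · rintro ((((hy | hy) | ⟨a, ha, hy⟩) | ⟨a, ha, hy⟩) | ⟨a, ha, i, hi, hy⟩)
              · exact Or.inl hy
              · exact Or.inr ⟨hq, Or.inl hy⟩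
              · exact Or.inr ⟨hq, Or.inr (Or.inl ⟨a, ha, Or.inl hy.symm⟩)⟩
              · exact Or.inr ⟨hq, Or.inr (Or.inl ⟨a, ha, Or.inr hy.symm⟩)⟩
              · exact Or.inr ⟨hq, Or.inr (Or.inr ⟨a, ha, i, hi, hy.symm⟩)⟩
            · rintro (hy | ⟨-, hy | ⟨a, ha, hy | hy⟩ | ⟨a, ha, i, hi, hy⟩⟩)
              · exact Or.inl (Or.inl (Or.inl (Or.inl hy)))
              · exact Or.inl (Or.inl (Or.inl (Or.inr hy)))
              · exact Or.inl (Or.inl (Or.inr ⟨a, ha, hy.symm⟩))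
              · exact Or.inl (Or.inr ⟨a, ha, hy.symm⟩)
              · exact Or.inr ⟨a, ha, i, hi, hy.symm⟩
          · tauto)]
      unfold CandP
      constructor
      · rintro (hy | ⟨w, hw, hq, hg⟩)
        · exact Or.inl hy
        · refine Or.inr ⟨String.ofList w, ?_, by simpa using hq, by simpa using hg⟩
          unfold WordP
          rcases List.mem_append.mp hw with hw | hw
          · simp only [List.mem_singleton] at hw
            subst hw; exact Or.inl String.ofList_toList
          · cases leet_mode with
            | false => simp at hw
            | true =>
              rw [if_pos rfl, pvLeetVariants_eq] at hw
              exact Or.inr ⟨rfl, w, hw, rfl⟩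
      · rintro (hy | ⟨word, hw, hq, hg⟩)
        · exact Or.inl hy
        · refine Or.inr ⟨word.toList, ?_, hq, hg⟩
          unfold WordP at hw
          rcases hw with rfl | ⟨hl, t, ht, rfl⟩
          · exact List.mem_append.mpr (Or.inl (by simp))
          · refine List.mem_append.mpr (Or.inr ?_)
            subst hl
            rw [if_pos rfl, pvLeetVariants_eq]
            simpa using ht)]
  simp

theorem nodup_A_final (raw_combos specials middles : List String) (leet_mode : Bool)
    (max_length : Int) :
    (raw_combos.foldl (fun final_set combo =>
      (if leet_mode then
          PySem.Set.union (PySem.Set.add PySem.Set.empty combo) (generate_leet_variants combo.toList)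
        else PySem.Set.add PySem.Set.empty combo).foldl (fun fs word =>
        if 0 < word.toList.length ∧ (word.toList.length : Int) ≤ max_length then
          PySem.Set.union (PySem.Set.add fs word) (insert_specials word specials middles)
        else fs) final_set) (PySem.Set.empty : PySem.Set String)).Nodup := by
  refine pv_nodup_foldl _ ?_ raw_combos _ (by simp [PySem.Set.empty])
  intro s combo hs
  refine pv_nodup_foldl _ ?_ _ _ hs
  intro s word hs'
  split_ifs with hq
  · exact PySem.Set.nodup_union _ _ (PySem.Set.nodup_add _ _ hs')
  · exact hs'

-- ===== VERDICT (by name: the statement is the Claim_ definition above) =====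
theorem format_combos_spec : Claim_equal_format_combos := by
  intro raw_combos specials middle_specials leet_mode max_length _
  unfold Spec_format_combos format_combos format_combos_alt
  apply PySem.List.sorted_eq_sorted_of_perm _ _ _ (fun a b h => h)
  rw [List.perm_ext_iff_of_nodup (nodup_A_final ..) (PySem.Set.nodup_ofList _)]
  intro y
  rw [PySem.Set.mem_ofList, mem_A_final, mem_B_candidates]
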